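-- pv_equiv track=rewrite | github.com/ralskwo/CodingTest | BAEKJOON/1946 - 신입 사원/신입 사원.py | max_hires
-- ===== SOURCE A (Python) =====
-- def max_hires(candidates):
--     # 서류 심사 성적 순위를 기준으로 지원자 목록을 오름차순 정렬
--     candidates.sort()
--
--     # 첫 번째 지원자는 무조건 선발되므로 최대 인원을 1로 초기화
--     max_count = 1
--
--     # 첫 번째 지원자의 면접 순위를 최소 면접 순위로 설정
--     min_interview_rank = candidates[0][1]
--
--     # 두 번째 지원자부터 마지막 지원자까지 순회하며 선발 여부 결정
--     for i in range(1, len(candidates)):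
--         # 현재 지원자의 면접 순위가 이전까지의 최소 면접 순위보다 높으면 선발
--         if candidates[i][1] < min_interview_rank:
--             # 선발된 인원수를 1 증가
--             max_count += 1
--             # 최소 면접 순위를 현재 지원자의 면접 순위로 갱신
--             min_interview_rank = candidates[i][1]
--
--     # 선발된 최대 인원수를 반환
--     return max_count
-- ===== SOURCE B (Python) =====
-- def _ltr_minima(ranks):
--     # number of left-to-right strict minima of ranks, by filter-recursion:
--     # the head is always a minimum; later minima are exactly the minima of the
--     # tail restricted to values strictly below the head.
--     if not ranks:
--         return 0
--     head = ranks[0]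
--     return 1 + _ltr_minima([r for r in ranks[1:] if r < head])
--
--
-- def max_hires(candidates):
--     candidates.sort()
--     return _ltr_minima([b for _, b in candidates])
-- ===== Notes on version B (the rewrite author's own statement) =====
-- stated objective: alternative
-- what changed: Replaces A's index loop carrying a running-minimum/counter state by a stateless filter-recursion that counts left-to-right minima of the interview ranks (head is a minimum; recurse on the tail restricted to values below the head).
import Mathlib
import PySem

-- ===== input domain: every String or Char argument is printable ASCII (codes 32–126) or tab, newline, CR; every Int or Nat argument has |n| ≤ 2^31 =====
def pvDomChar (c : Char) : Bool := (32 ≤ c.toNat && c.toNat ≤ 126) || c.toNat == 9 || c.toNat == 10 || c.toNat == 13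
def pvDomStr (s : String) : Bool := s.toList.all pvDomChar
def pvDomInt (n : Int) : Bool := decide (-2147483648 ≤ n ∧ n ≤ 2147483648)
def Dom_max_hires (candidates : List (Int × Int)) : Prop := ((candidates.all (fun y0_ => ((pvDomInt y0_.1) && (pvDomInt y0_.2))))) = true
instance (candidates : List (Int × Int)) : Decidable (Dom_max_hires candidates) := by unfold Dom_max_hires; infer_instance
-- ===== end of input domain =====

-- B replaces A's stateful running-minimum scan by a filter-recursion counting left-to-right
-- minima (alternative decomposition, same sort). Both Pythons sort `candidates` in place;
-- the equivalence proved here is about the return value.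

-- ===== PORT A =====
def max_hires (candidates : List (Int × Int)) : Int :=
  let cs := PySem.List.sorted candidates (fun c => toLex c) false
  match cs with
  | [] => -1  -- unreachable under Pre_max_hires: Python raises IndexError at candidates[0][1]
  | c0 :: rest =>
    (rest.foldl (fun (st : Int × Int) c =>
      if c.2 < st.2 then (st.1 + 1, c.2) else st) (1, c0.2)).1

-- ===== PORT B =====
def ltrMinima : List Int → Int
  | [] => 0
  | r :: rs => 1 + ltrMinima (rs.filter (fun x => decide (x < r)))
  termination_by l => l.length
  decreasing_by
    simpa using Nat.lt_succ_of_le ((List.length_filter_le _ _).trans (Nat.le_of_eq List.length_attach))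

def max_hires_alt (candidates : List (Int × Int)) : Int :=
  let cs := PySem.List.sorted candidates (fun c => toLex c) false
  ltrMinima (cs.map (fun c => c.2))

-- ===== PRECONDITION & SPEC =====
-- Pre_ excludes only the empty list, on which Python A raises IndexError.
def Pre_max_hires (candidates : List (Int × Int)) : Prop := candidates ≠ []
instance (candidates : List (Int × Int)) : Decidable (Pre_max_hires candidates) := by unfold Pre_max_hires; infer_instance
def pvWitness_max_hires : (List (Int × Int)) := [(1, 4), (2, 3), (3, 2), (4, 1)]

def Spec_max_hires (candidates : List (Int × Int)) (out : Int) : Prop := out = max_hires_alt candidates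
instance (candidates : List (Int × Int)) (out : Int) : Decidable (Spec_max_hires candidates out) := by unfold Spec_max_hires; infer_instance

-- ===== CLAIM (what is proved, stated in full; the proofs are below) =====
def Claim_equal_max_hires : Prop := ∀ (candidates : List (Int × Int)), Dom_max_hires candidates → Pre_max_hires candidates → Spec_max_hires candidates (max_hires candidates)

-- ===== LEMMAS AND PROOFS =====

theorem ltrMinima_nil : ltrMinima [] = 0 := by
  simp [ltrMinima]

theorem ltrMinima_cons (r : Int) (rs : List Int) :
    ltrMinima (r :: rs) = 1 + ltrMinima (rs.filter (fun x => decide (x < r))) := by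
  simp [ltrMinima]

-- A's fold starting from (count, m) adds the number of left-to-right minima of the
-- remaining interview ranks that lie strictly below m.
theorem fold_eq_ltrMinima (rs : List (Int × Int)) : ∀ (count m : Int),
    (rs.foldl (fun (st : Int × Int) c =>
      if c.2 < st.2 then (st.1 + 1, c.2) else st) (count, m)).1
      = count + ltrMinima ((rs.map Prod.snd).filter (fun x => decide (x < m))) := by
  induction rs with
  | nil => intro count m; simp [ltrMinima_nil]
  | cons r rest ih =>
    intro count m
    by_cases h : r.2 < m
    · have hff : ((rest.map Prod.snd).filter (fun x => decide (x < m))).filter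
          (fun x => decide (x < r.2)) = (rest.map Prod.snd).filter (fun x => decide (x < r.2)) := by
        rw [List.filter_filter]
        exact List.filter_congr (fun x _ => by
          by_cases hx : x < r.2
          · simp [hx, lt_trans hx h]
          · simp [hx])
      simp only [List.foldl_cons, if_pos h, ih, List.map_cons, List.filter_cons,
        decide_eq_true h, if_true, ltrMinima_cons, hff]
      ring
    · simp only [List.foldl_cons, if_neg h, ih, List.map_cons, List.filter_cons,
        decide_eq_false h, Bool.false_eq_true, if_false]

-- ===== VERDICT (by name: the statement is the Claim_ definition above) =====
theorem max_hires_spec : Claim_equal_max_hires := by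
  intro candidates _ hpre
  unfold Spec_max_hires max_hires max_hires_alt
  cases h : PySem.List.sorted candidates (fun c => toLex c) false with
  | nil =>
    have hp := PySem.List.sorted_perm candidates (fun c => toLex c) false
    rw [h] at hp
    exact absurd hp.symm.eq_nil hpre
  | cons c0 rest =>
    simp only [fold_eq_ltrMinima, List.map_cons, ltrMinima_cons]
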